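-- pv_equiv track=rewrite | github.com/Devrockzz654/YogaPoseFusion | backend/models/recommendations.py | _health_support_for_pose
-- ===== SOURCE A (Python) =====
-- def _contains(text: str, *patterns: str) -> bool:
--     return any(pattern in text for pattern in patterns)
--
-- def _health_support_for_pose(text: str, families: list[str]):
--     support = []
--
--     def add_support(name: str):
--         if name not in support:
--             support.append(name)
--
--     if any(family in families for family in ["restorative", "supine", "twist", "seated"]):
--         add_support("stress_relief")
--     if any(family in families for family in ["posture", "backbend", "standing", "core"]):
--         add_support("poor_posture")
--     if any(family in families for family in ["standing", "balance"]) or _contains(text, "warrior", "tree pose", "eagle pose"):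
--         add_support("balance_support")
--     if any(family in families for family in ["core", "arm_balance"]) or _contains(text, "plank pose", "boat pose"):
--         add_support("core_strength")
--     if any(family in families for family in ["standing", "backbend", "core", "inversion"]):
--         add_support("low_energy")
--     if any(family in families for family in ["forward_fold", "standing"]) or _contains(text, "downward facing dog"):
--         add_support("stiff_hamstrings")
--     if any(family in families for family in ["hip_opener", "kneeling"]) or _contains(text, "tree pose"):
--         add_support("hip_tightness")
--     if any(family in families for family in ["shoulder_opener", "posture"]) and "inversion" not in families:
--         add_support("shoulder_tightness")
--     if _contains(text, "child pose", "cat cow", "bridge pose", "legs up the wall", "wind relieving"):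
--         add_support("back_pain")
--     if any(family in families for family in ["restorative", "supine", "seated"]) and "kneeling" not in families:
--         add_support("knee_sensitivity")
--     return support
-- ===== SOURCE B (Python) =====
-- # Inverted index: scan the input families once against family->tags / family->blocked maps,
-- # collect text-pattern hits, then emit the canonical tag order filtered by the two sets.
-- _FAMILY_TAGS = {
--     "restorative": ("stress_relief", "knee_sensitivity"),
--     "supine": ("stress_relief", "knee_sensitivity"),
--     "twist": ("stress_relief",),
--     "seated": ("stress_relief", "knee_sensitivity"),
--     "posture": ("poor_posture", "shoulder_tightness"),
--     "backbend": ("poor_posture", "low_energy"),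
--     "standing": ("poor_posture", "balance_support", "low_energy", "stiff_hamstrings"),
--     "core": ("poor_posture", "core_strength", "low_energy"),
--     "balance": ("balance_support",),
--     "arm_balance": ("core_strength",),
--     "inversion": ("low_energy",),
--     "forward_fold": ("stiff_hamstrings",),
--     "hip_opener": ("hip_tightness",),
--     "kneeling": ("hip_tightness",),
--     "shoulder_opener": ("shoulder_tightness",),
-- }
-- _BLOCKS = {
--     "inversion": ("shoulder_tightness",),
--     "kneeling": ("knee_sensitivity",),
-- }
-- _TEXT_TAGS = {
--     "warrior": ("balance_support",),
--     "tree pose": ("balance_support", "hip_tightness"),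
--     "eagle pose": ("balance_support",),
--     "plank pose": ("core_strength",),
--     "boat pose": ("core_strength",),
--     "downward facing dog": ("stiff_hamstrings",),
--     "child pose": ("back_pain",),
--     "cat cow": ("back_pain",),
--     "bridge pose": ("back_pain",),
--     "legs up the wall": ("back_pain",),
--     "wind relieving": ("back_pain",),
-- }
-- _ORDER = ["stress_relief", "poor_posture", "balance_support", "core_strength",
--           "low_energy", "stiff_hamstrings", "hip_tightness", "shoulder_tightness",
--           "back_pain", "knee_sensitivity"]
--
-- def _health_support_for_pose(text: str, families: list[str]):
--     triggered = set()
--     blocked = set()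
--     for f in families:
--         triggered.update(_FAMILY_TAGS.get(f, ()))
--         blocked.update(_BLOCKS.get(f, ()))
--     for pattern, tags in _TEXT_TAGS.items():
--         if pattern in text:
--             triggered.update(tags)
--     return [t for t in _ORDER if t in triggered and t not in blocked]
-- ===== Notes on version B (the rewrite author's own statement) =====
-- stated objective: alternative
-- what changed: Inverts the rule set into family->tags, family->blocked-tags and text-pattern->tags maps: B scans the input families once accumulating a triggered-tag set and a blocked-tag set, adds pattern hits, and emits the canonical tag order filtered by those sets, instead of A's ten if-branches each scanning the families list.
import Mathlib
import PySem

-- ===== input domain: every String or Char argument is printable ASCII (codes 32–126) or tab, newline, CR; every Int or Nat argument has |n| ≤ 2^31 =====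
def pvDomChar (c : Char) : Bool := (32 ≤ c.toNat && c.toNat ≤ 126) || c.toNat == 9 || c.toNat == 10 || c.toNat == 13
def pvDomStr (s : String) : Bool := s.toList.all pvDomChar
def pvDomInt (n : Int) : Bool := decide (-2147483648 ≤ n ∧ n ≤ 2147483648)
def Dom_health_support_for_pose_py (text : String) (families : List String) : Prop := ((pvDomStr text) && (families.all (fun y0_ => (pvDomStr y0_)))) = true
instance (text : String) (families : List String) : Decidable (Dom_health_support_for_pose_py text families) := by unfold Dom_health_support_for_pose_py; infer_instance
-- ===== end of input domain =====

-- B inverts A's ten rule branches into family->tags / family->blocked / pattern->tags maps, scans the input families once accumulating two sets, and filters the canonical tag order (objective: alternative).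


-- ===== PORT A =====
-- helper: Python's local add_support (append if not already present)
def pyAddSupport (support : List String) (name : String) : List String :=
  if support.contains name then support else support ++ [name]

-- helper: module-level _contains(text, *patterns)
def pyContainsAny (text : String) (patterns : List String) : Bool :=
  patterns.any (fun p => PySem.Str.isIn p text)

def health_support_for_pose_py (text : String) (families : List String) : List String :=
  let support : List String := []
  let support := if ["restorative", "supine", "twist", "seated"].any (fun f => families.contains f) then pyAddSupport support "stress_relief" else support
  let support := if ["posture", "backbend", "standing", "core"].any (fun f => families.contains f) then pyAddSupport support "poor_posture" else support
  let support := if ["standing", "balance"].any (fun f => families.contains f) || pyContainsAny text ["warrior", "tree pose", "eagle pose"] then pyAddSupport support "balance_support" else support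
  let support := if ["core", "arm_balance"].any (fun f => families.contains f) || pyContainsAny text ["plank pose", "boat pose"] then pyAddSupport support "core_strength" else support
  let support := if ["standing", "backbend", "core", "inversion"].any (fun f => families.contains f) then pyAddSupport support "low_energy" else support
  let support := if ["forward_fold", "standing"].any (fun f => families.contains f) || pyContainsAny text ["downward facing dog"] then pyAddSupport support "stiff_hamstrings" else support
  let support := if ["hip_opener", "kneeling"].any (fun f => families.contains f) || pyContainsAny text ["tree pose"] then pyAddSupport support "hip_tightness" else support
  let support := if ["shoulder_opener", "posture"].any (fun f => families.contains f) && !families.contains "inversion" then pyAddSupport support "shoulder_tightness" else support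
  let support := if pyContainsAny text ["child pose", "cat cow", "bridge pose", "legs up the wall", "wind relieving"] then pyAddSupport support "back_pain" else support
  let support := if ["restorative", "supine", "seated"].any (fun f => families.contains f) && !families.contains "kneeling" then pyAddSupport support "knee_sensitivity" else support
  support

-- ===== PORT B =====
-- the inverted index: which tags each pose family triggers
def pvFamilyTags : PySem.Dict String (List String) := PySem.Dict.ofList
  [ ("restorative", ["stress_relief", "knee_sensitivity"]),
    ("supine", ["stress_relief", "knee_sensitivity"]),
    ("twist", ["stress_relief"]),
    ("seated", ["stress_relief", "knee_sensitivity"]),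
    ("posture", ["poor_posture", "shoulder_tightness"]),
    ("backbend", ["poor_posture", "low_energy"]),
    ("standing", ["poor_posture", "balance_support", "low_energy", "stiff_hamstrings"]),
    ("core", ["poor_posture", "core_strength", "low_energy"]),
    ("balance", ["balance_support"]),
    ("arm_balance", ["core_strength"]),
    ("inversion", ["low_energy"]),
    ("forward_fold", ["stiff_hamstrings"]),
    ("hip_opener", ["hip_tightness"]),
    ("kneeling", ["hip_tightness"]),
    ("shoulder_opener", ["shoulder_tightness"]) ]

-- which tags a family suppresses
def pvBlocks : PySem.Dict String (List String) := PySem.Dict.ofList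
  [ ("inversion", ["shoulder_tightness"]),
    ("kneeling", ["knee_sensitivity"]) ]

-- which tags a text pattern triggers
def pvTextTags : PySem.Dict String (List String) := PySem.Dict.ofList
  [ ("warrior", ["balance_support"]),
    ("tree pose", ["balance_support", "hip_tightness"]),
    ("eagle pose", ["balance_support"]),
    ("plank pose", ["core_strength"]),
    ("boat pose", ["core_strength"]),
    ("downward facing dog", ["stiff_hamstrings"]),
    ("child pose", ["back_pain"]),
    ("cat cow", ["back_pain"]),
    ("bridge pose", ["back_pain"]),
    ("legs up the wall", ["back_pain"]),
    ("wind relieving", ["back_pain"]) ]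

-- canonical output order of the tags
def pvOrder : List String :=
  ["stress_relief", "poor_posture", "balance_support", "core_strength", "low_energy",
   "stiff_hamstrings", "hip_tightness", "shoulder_tightness", "back_pain", "knee_sensitivity"]

-- the 'for f in families' loop: accumulate (triggered, blocked)
def pvScanFamilies (families : List String) : PySem.Set String × PySem.Set String :=
  families.foldl
    (fun tb f => (PySem.Set.update tb.1 (pvFamilyTags.getD f []),
                  PySem.Set.update tb.2 (pvBlocks.getD f [])))
    (PySem.Set.empty, PySem.Set.empty)

-- the 'for pattern, tags in _TEXT_TAGS.items()' loop
def pvScanPatterns (text : String) (s : PySem.Set String) : PySem.Set String :=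
  pvTextTags.items.foldl
    (fun s kv => if PySem.Str.isIn kv.1 text then PySem.Set.update s kv.2 else s) s

def health_support_for_pose_py_alt (text : String) (families : List String) : List String :=
  let tb := pvScanFamilies families
  let triggered := pvScanPatterns text tb.1
  pvOrder.filter (fun t => PySem.Set.contains triggered t && !PySem.Set.contains tb.2 t)

-- ===== PRECONDITION & SPEC =====
def Spec_health_support_for_pose_py (text : String) (families : List String) (out : List String) : Prop := out = health_support_for_pose_py_alt text families
instance (text : String) (families : List String) (out : List String) : Decidable (Spec_health_support_for_pose_py text families out) := by unfold Spec_health_support_for_pose_py; infer_instance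

-- ===== CLAIM (what is proved, stated in full; the proofs are below) =====
def Claim_equal_health_support_for_pose_py : Prop := ∀ (text : String) (families : List String), Dom_health_support_for_pose_py text families → Spec_health_support_for_pose_py text families (health_support_for_pose_py text families)

-- ===== LEMMAS AND PROOFS =====
-- canonical 'cons if' building block
def consIf (c : Bool) (x : String) (l : List String) : List String := if c then x :: l else l

-- A's branch sequence, generalized over its ten conditions, equals the canonical consIf chain
theorem key : ∀ (c1 c2 c3 c4 c5 c6 c7 c8 c9 c10 : Bool),
    (let support : List String := []
     let support := if c1 then pyAddSupport support "stress_relief" else support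
     let support := if c2 then pyAddSupport support "poor_posture" else support
     let support := if c3 then pyAddSupport support "balance_support" else support
     let support := if c4 then pyAddSupport support "core_strength" else support
     let support := if c5 then pyAddSupport support "low_energy" else support
     let support := if c6 then pyAddSupport support "stiff_hamstrings" else support
     let support := if c7 then pyAddSupport support "hip_tightness" else support
     let support := if c8 then pyAddSupport support "shoulder_tightness" else support
     let support := if c9 then pyAddSupport support "back_pain" else support
     let support := if c10 then pyAddSupport support "knee_sensitivity" else support
     support)
    = consIf c1 "stress_relief" (consIf c2 "poor_posture" (consIf c3 "balance_support"
      (consIf c4 "core_strength" (consIf c5 "low_energy" (consIf c6 "stiff_hamstrings"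
      (consIf c7 "hip_tightness" (consIf c8 "shoulder_tightness" (consIf c9 "back_pain"
      (consIf c10 "knee_sensitivity" []))))))))) := by decide

-- first match in an assoc list with distinct keys = any match
theorem find?_mem_iff (ps : List (String × List String)) (h : (ps.map Prod.fst).Nodup)
    (t f : String) :
    t ∈ (Option.map Prod.snd (ps.find? (fun p => p.1 == f))).getD [] ↔
      ∃ kv ∈ ps, kv.1 = f ∧ t ∈ kv.2 := by
  induction ps with
  | nil => simp
  | cons kv ps ih =>
    simp only [List.map_cons, List.nodup_cons] at h
    by_cases hk : kv.1 = f
    · subst hk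
      rw [List.find?_cons_of_pos (by simp)]
      simp only [Option.map_some, Option.getD_some, List.mem_cons]
      constructor
      · exact fun ht => ⟨kv, Or.inl rfl, rfl, ht⟩
      · rintro ⟨kv', (rfl | hmem), hk', ht⟩
        · exact ht
        · exact absurd (hk' ▸ (List.mem_map_of_mem hmem : kv'.1 ∈ ps.map Prod.fst)) h.1
    · rw [List.find?_cons_of_neg (by simpa using hk), ih h.2]
      simp only [List.mem_cons]
      constructor
      · rintro ⟨kv', hmem, hk', ht⟩; exact ⟨kv', Or.inr hmem, hk', ht⟩
      · rintro ⟨kv', (rfl | hmem), hk', ht⟩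
        · exact absurd hk' hk
        · exact ⟨kv', hmem, hk', ht⟩

theorem getD_mem_iff (d : PySem.Dict String (List String)) (h : d.keys.Nodup) (t f : String) :
    t ∈ d.getD f [] ↔ ∃ kv ∈ d.items, kv.1 = f ∧ t ∈ kv.2 := by
  have := find?_mem_iff d.items (by simpa [PySem.Dict.keys] using h) t f
  simpa [PySem.Dict.getD, PySem.Dict.get?] using this

-- the family-scan fold, generalized over its start
theorem foldl_pair_update_mem_fst (families : List String) (s b : PySem.Set String) (t : String) :
    t ∈ (families.foldl
      (fun tb f => (PySem.Set.update tb.1 (pvFamilyTags.getD f []),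
                    PySem.Set.update tb.2 (pvBlocks.getD f []))) (s, b)).1
    ↔ t ∈ s ∨ ∃ f ∈ families, t ∈ pvFamilyTags.getD f [] := by
  induction families generalizing s b with
  | nil => simp
  | cons x xs ih => simp [ih, PySem.Set.mem_update]; tauto

theorem foldl_pair_update_mem_snd (families : List String) (s b : PySem.Set String) (t : String) :
    t ∈ (families.foldl
      (fun tb f => (PySem.Set.update tb.1 (pvFamilyTags.getD f []),
                    PySem.Set.update tb.2 (pvBlocks.getD f []))) (s, b)).2
    ↔ t ∈ b ∨ ∃ f ∈ families, t ∈ pvBlocks.getD f [] := by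
  induction families generalizing s b with
  | nil => simp
  | cons x xs ih => simp [ih, PySem.Set.mem_update]; tauto

-- the pattern-scan fold, generalized over the table
theorem foldl_if_update_mem (text : String) (l : List (String × List String))
    (s : PySem.Set String) (t : String) :
    t ∈ l.foldl (fun s kv => if PySem.Str.isIn kv.1 text then PySem.Set.update s kv.2 else s) s
    ↔ t ∈ s ∨ ∃ kv ∈ l, PySem.Str.isIn kv.1 text = true ∧ t ∈ kv.2 := by
  induction l generalizing s with
  | nil => simp
  | cons kv l ih =>
    rw [List.foldl_cons]
    by_cases hp : PySem.Str.isIn kv.1 text = true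
    · rw [if_pos hp, ih]
      simp only [List.exists_mem_cons_iff, PySem.Set.mem_update, hp, true_and]
      tauto
    · rw [if_neg hp, ih]
      simp only [List.exists_mem_cons_iff]
      tauto

-- the literal items lists of the three tables
theorem itemsFT : pvFamilyTags.items =
  [ ("restorative", ["stress_relief", "knee_sensitivity"]),
    ("supine", ["stress_relief", "knee_sensitivity"]),
    ("twist", ["stress_relief"]),
    ("seated", ["stress_relief", "knee_sensitivity"]),
    ("posture", ["poor_posture", "shoulder_tightness"]),
    ("backbend", ["poor_posture", "low_energy"]),
    ("standing", ["poor_posture", "balance_support", "low_energy", "stiff_hamstrings"]),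
    ("core", ["poor_posture", "core_strength", "low_energy"]),
    ("balance", ["balance_support"]),
    ("arm_balance", ["core_strength"]),
    ("inversion", ["low_energy"]),
    ("forward_fold", ["stiff_hamstrings"]),
    ("hip_opener", ["hip_tightness"]),
    ("kneeling", ["hip_tightness"]),
    ("shoulder_opener", ["shoulder_tightness"]) ] := by decide

theorem itemsBL : pvBlocks.items =
  [ ("inversion", ["shoulder_tightness"]), ("kneeling", ["knee_sensitivity"]) ] := by decide

theorem itemsTT : pvTextTags.items =
  [ ("warrior", ["balance_support"]),
    ("tree pose", ["balance_support", "hip_tightness"]),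
    ("eagle pose", ["balance_support"]),
    ("plank pose", ["core_strength"]),
    ("boat pose", ["core_strength"]),
    ("downward facing dog", ["stiff_hamstrings"]),
    ("child pose", ["back_pain"]),
    ("cat cow", ["back_pain"]),
    ("bridge pose", ["back_pain"]),
    ("legs up the wall", ["back_pain"]),
    ("wind relieving", ["back_pain"]) ] := by decide

-- triggered-set membership, in terms of the tables' items
theorem mem_trig (text : String) (families : List String) (t : String) :
    t ∈ pvScanPatterns text (pvScanFamilies families).1 ↔
      (∃ kv ∈ pvFamilyTags.items, kv.1 ∈ families ∧ t ∈ kv.2) ∨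
      (∃ kv ∈ pvTextTags.items, PySem.Str.isIn kv.1 text = true ∧ t ∈ kv.2) := by
  rw [pvScanPatterns, foldl_if_update_mem, pvScanFamilies, foldl_pair_update_mem_fst]
  have hFT : ∀ f, t ∈ pvFamilyTags.getD f [] ↔ ∃ kv ∈ pvFamilyTags.items, kv.1 = f ∧ t ∈ kv.2 :=
    fun f => getD_mem_iff pvFamilyTags (by rw [show pvFamilyTags.keys = pvFamilyTags.items.map Prod.fst from rfl, itemsFT]; decide) t f
  simp only [hFT, PySem.Set.empty, List.not_mem_nil, false_or]
  constructor
  · rintro (⟨f, hf, kv, hkv, rfl, ht⟩ | h)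
    · exact Or.inl ⟨kv, hkv, hf, ht⟩
    · exact Or.inr h
  · rintro (⟨kv, hkv, hf, ht⟩ | h)
    · exact Or.inl ⟨kv.1, hf, kv, hkv, rfl, ht⟩
    · exact Or.inr h

-- blocked-set membership, in terms of the blocks table's items
theorem mem_blk (families : List String) (t : String) :
    t ∈ (pvScanFamilies families).2 ↔
      ∃ kv ∈ pvBlocks.items, kv.1 ∈ families ∧ t ∈ kv.2 := by
  rw [pvScanFamilies, foldl_pair_update_mem_snd]
  have hBL : ∀ f, t ∈ pvBlocks.getD f [] ↔ ∃ kv ∈ pvBlocks.items, kv.1 = f ∧ t ∈ kv.2 :=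
    fun f => getD_mem_iff pvBlocks (by rw [show pvBlocks.keys = pvBlocks.items.map Prod.fst from rfl, itemsBL]; decide) t f
  simp only [hBL, PySem.Set.empty, List.not_mem_nil, false_or]
  constructor
  · rintro ⟨f, hf, kv, hkv, rfl, ht⟩; exact ⟨kv, hkv, hf, ht⟩
  · rintro ⟨kv, hkv, hf, ht⟩; exact ⟨kv.1, hf, kv, hkv, rfl, ht⟩

-- ===== VERDICT (by name: the statement is the Claim_ definition above) =====
set_option maxHeartbeats 2000000 in
theorem health_support_for_pose_py_spec : Claim_equal_health_support_for_pose_py := by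
  intro text families _
  unfold Spec_health_support_for_pose_py
  have htrig : ∀ t : String,
      PySem.Set.contains (pvScanPatterns text (pvScanFamilies families).1) t = true ↔
        (∃ kv ∈ pvFamilyTags.items, kv.1 ∈ families ∧ t ∈ kv.2) ∨
        (∃ kv ∈ pvTextTags.items, PySem.Str.isIn kv.1 text = true ∧ t ∈ kv.2) := by
    intro t; rw [PySem.Set.contains_iff, mem_trig]
  have hblk : ∀ t : String,
      PySem.Set.contains (pvScanFamilies families).2 t = true ↔
        ∃ kv ∈ pvBlocks.items, kv.1 ∈ families ∧ t ∈ kv.2 := by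
    intro t; rw [PySem.Set.contains_iff, mem_blk]
  refine Eq.trans (key
      (["restorative", "supine", "twist", "seated"].any (fun f => families.contains f))
      (["posture", "backbend", "standing", "core"].any (fun f => families.contains f))
      ((["standing", "balance"].any (fun f => families.contains f)) || pyContainsAny text ["warrior", "tree pose", "eagle pose"])
      ((["core", "arm_balance"].any (fun f => families.contains f)) || pyContainsAny text ["plank pose", "boat pose"])
      (["standing", "backbend", "core", "inversion"].any (fun f => families.contains f))
      ((["forward_fold", "standing"].any (fun f => families.contains f)) || pyContainsAny text ["downward facing dog"])
      ((["hip_opener", "kneeling"].any (fun f => families.contains f)) || pyContainsAny text ["tree pose"])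
      ((["shoulder_opener", "posture"].any (fun f => families.contains f)) && !families.contains "inversion")
      (pyContainsAny text ["child pose", "cat cow", "bridge pose", "legs up the wall", "wind relieving"])
      ((["restorative", "supine", "seated"].any (fun f => families.contains f)) && !families.contains "kneeling")) ?_
  simp only [health_support_for_pose_py_alt, pvOrder, List.filter_cons, List.filter_nil]
  have h1 : (PySem.Set.contains (pvScanPatterns text (pvScanFamilies families).1) "stress_relief"
      && !PySem.Set.contains (pvScanFamilies families).2 "stress_relief")
      = (["restorative", "supine", "twist", "seated"].any (fun f => families.contains f)) := by
    rw [Bool.eq_iff_iff]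
    simp only [Bool.and_eq_true, Bool.not_eq_eq_eq_not, Bool.not_true, Bool.eq_false_iff, ne_eq,
      htrig, hblk, itemsFT, itemsBL, itemsTT, List.not_mem_nil,
      List.mem_cons, List.any_eq_true, List.contains_iff_mem, pyContainsAny, Bool.or_eq_true]
    try simp
    try tauto
  have h2 : (PySem.Set.contains (pvScanPatterns text (pvScanFamilies families).1) "poor_posture"
      && !PySem.Set.contains (pvScanFamilies families).2 "poor_posture")
      = (["posture", "backbend", "standing", "core"].any (fun f => families.contains f)) := by
    rw [Bool.eq_iff_iff]
    simp only [Bool.and_eq_true, Bool.not_eq_eq_eq_not, Bool.not_true, Bool.eq_false_iff, ne_eq,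
      htrig, hblk, itemsFT, itemsBL, itemsTT, List.not_mem_nil,
      List.mem_cons, List.any_eq_true, List.contains_iff_mem, pyContainsAny, Bool.or_eq_true]
    try simp
    try tauto
  have h3 : (PySem.Set.contains (pvScanPatterns text (pvScanFamilies families).1) "balance_support"
      && !PySem.Set.contains (pvScanFamilies families).2 "balance_support")
      = ((["standing", "balance"].any (fun f => families.contains f)) || pyContainsAny text ["warrior", "tree pose", "eagle pose"]) := by
    rw [Bool.eq_iff_iff]
    simp only [Bool.and_eq_true, Bool.not_eq_eq_eq_not, Bool.not_true, Bool.eq_false_iff, ne_eq,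
      htrig, hblk, itemsFT, itemsBL, itemsTT, List.not_mem_nil,
      List.mem_cons, List.any_eq_true, List.contains_iff_mem, pyContainsAny, Bool.or_eq_true]
    try simp
    try tauto
  have h4 : (PySem.Set.contains (pvScanPatterns text (pvScanFamilies families).1) "core_strength"
      && !PySem.Set.contains (pvScanFamilies families).2 "core_strength")
      = ((["core", "arm_balance"].any (fun f => families.contains f)) || pyContainsAny text ["plank pose", "boat pose"]) := by
    rw [Bool.eq_iff_iff]
    simp only [Bool.and_eq_true, Bool.not_eq_eq_eq_not, Bool.not_true, Bool.eq_false_iff, ne_eq,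
      htrig, hblk, itemsFT, itemsBL, itemsTT, List.not_mem_nil,
      List.mem_cons, List.any_eq_true, List.contains_iff_mem, pyContainsAny, Bool.or_eq_true]
    try simp
    try tauto
  have h5 : (PySem.Set.contains (pvScanPatterns text (pvScanFamilies families).1) "low_energy"
      && !PySem.Set.contains (pvScanFamilies families).2 "low_energy")
      = (["standing", "backbend", "core", "inversion"].any (fun f => families.contains f)) := by
    rw [Bool.eq_iff_iff]
    simp only [Bool.and_eq_true, Bool.not_eq_eq_eq_not, Bool.not_true, Bool.eq_false_iff, ne_eq,
      htrig, hblk, itemsFT, itemsBL, itemsTT, List.not_mem_nil,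
      List.mem_cons, List.any_eq_true, List.contains_iff_mem, pyContainsAny, Bool.or_eq_true]
    try simp
    try tauto
  have h6 : (PySem.Set.contains (pvScanPatterns text (pvScanFamilies families).1) "stiff_hamstrings"
      && !PySem.Set.contains (pvScanFamilies families).2 "stiff_hamstrings")
      = ((["forward_fold", "standing"].any (fun f => families.contains f)) || pyContainsAny text ["downward facing dog"]) := by
    rw [Bool.eq_iff_iff]
    simp only [Bool.and_eq_true, Bool.not_eq_eq_eq_not, Bool.not_true, Bool.eq_false_iff, ne_eq,
      htrig, hblk, itemsFT, itemsBL, itemsTT, List.not_mem_nil,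
      List.mem_cons, List.any_eq_true, List.contains_iff_mem, pyContainsAny, Bool.or_eq_true]
    try simp
    try tauto
  have h7 : (PySem.Set.contains (pvScanPatterns text (pvScanFamilies families).1) "hip_tightness"
      && !PySem.Set.contains (pvScanFamilies families).2 "hip_tightness")
      = ((["hip_opener", "kneeling"].any (fun f => families.contains f)) || pyContainsAny text ["tree pose"]) := by
    rw [Bool.eq_iff_iff]
    simp only [Bool.and_eq_true, Bool.not_eq_eq_eq_not, Bool.not_true, Bool.eq_false_iff, ne_eq,
      htrig, hblk, itemsFT, itemsBL, itemsTT, List.not_mem_nil,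
      List.mem_cons, List.any_eq_true, List.contains_iff_mem, pyContainsAny, Bool.or_eq_true]
    try simp
    try tauto
  have h8 : (PySem.Set.contains (pvScanPatterns text (pvScanFamilies families).1) "shoulder_tightness"
      && !PySem.Set.contains (pvScanFamilies families).2 "shoulder_tightness")
      = ((["shoulder_opener", "posture"].any (fun f => families.contains f)) && !families.contains "inversion") := by
    rw [Bool.eq_iff_iff]
    simp only [Bool.and_eq_true, Bool.not_eq_eq_eq_not, Bool.not_true, Bool.eq_false_iff, ne_eq,
      htrig, hblk, itemsFT, itemsBL, itemsTT, List.not_mem_nil,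
      List.mem_cons, List.any_eq_true, List.contains_iff_mem, pyContainsAny, Bool.or_eq_true]
    try simp
    try tauto
  have h9 : (PySem.Set.contains (pvScanPatterns text (pvScanFamilies families).1) "back_pain"
      && !PySem.Set.contains (pvScanFamilies families).2 "back_pain")
      = (pyContainsAny text ["child pose", "cat cow", "bridge pose", "legs up the wall", "wind relieving"]) := by
    rw [Bool.eq_iff_iff]
    simp only [Bool.and_eq_true, Bool.not_eq_eq_eq_not, Bool.not_true, Bool.eq_false_iff, ne_eq,
      htrig, hblk, itemsFT, itemsBL, itemsTT, List.not_mem_nil,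
      List.mem_cons, List.any_eq_true, List.contains_iff_mem, pyContainsAny, Bool.or_eq_true]
    try simp
    try tauto
  have h10 : (PySem.Set.contains (pvScanPatterns text (pvScanFamilies families).1) "knee_sensitivity"
      && !PySem.Set.contains (pvScanFamilies families).2 "knee_sensitivity")
      = ((["restorative", "supine", "seated"].any (fun f => families.contains f)) && !families.contains "kneeling") := by
    rw [Bool.eq_iff_iff]
    simp only [Bool.and_eq_true, Bool.not_eq_eq_eq_not, Bool.not_true, Bool.eq_false_iff, ne_eq,
      htrig, hblk, itemsFT, itemsBL, itemsTT, List.not_mem_nil,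
      List.mem_cons, List.any_eq_true, List.contains_iff_mem, pyContainsAny, Bool.or_eq_true]
    try simp
    try tauto
  rw [h1, h2, h3, h4, h5, h6, h7, h8, h9, h10]
  simp only [consIf]
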